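-- pv_equiv track=rewrite | github.com/banana-galaxy/challenges | challenge19(prime)/solutions/KirbyYourMom.py | solution
-- ===== SOURCE A (Python) =====
-- def solution(p,v):
--  F=lambda v,s:F(s,v%s)if s else v
--  l=len(v)+1
--  s=[-1]*l
--  for i in range(l-2):
--   f=F(v[i],v[i+1])
--   if f!=v[i]:
--    s[i+1]=f
--    for j in range(i+2,l):s[j]=v[j-1]//s[j-1]
--    for j in range(i,-1,-1):s[j]=v[j]//s[j+1]
--  return''.join(chr(sorted(set(s)).index(x)+65)for x in s)
-- ===== SOURCE B (Python) =====
-- def solution(p, v):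
--     def g(a, b):
--         while b:
--             a, b = b, a % b
--         return a
--     l = len(v) + 1
--     last = next((i for i in range(len(v) - 2, -1, -1) if g(v[i], v[i + 1]) != v[i]), None)
--     if last is None:
--         s = [-1] * l
--     else:
--         f = g(v[last], v[last + 1])
--         up = [f]
--         for x in v[last + 1:]:
--             up.append(x // up[-1])
--         down = [f]
--         for x in reversed(v[:last + 1]):
--             down.append(x // down[-1])
--         s = down[:0:-1] + up
--     ranks = {x: k for k, x in enumerate(sorted(set(s)))}
--     return ''.join(chr(ranks[x] + 65) for x in s)
-- ===== Notes on version B (the rewrite author's own statement) =====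
-- stated objective: faster
-- what changed: Only the last index i with gcd(v[i],v[i+1]) != v[i] determines the array, so B finds that index by one backward scan and builds s once (two quotient chains), and replaces the per-character sorted(set).index scan by a rank dictionary built once.
-- outside the precondition, e.g. on solution(0, [6, 4, 1, 7]): A raises ZeroDivisionError, B returns 'ABAAC'
import Mathlib
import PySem

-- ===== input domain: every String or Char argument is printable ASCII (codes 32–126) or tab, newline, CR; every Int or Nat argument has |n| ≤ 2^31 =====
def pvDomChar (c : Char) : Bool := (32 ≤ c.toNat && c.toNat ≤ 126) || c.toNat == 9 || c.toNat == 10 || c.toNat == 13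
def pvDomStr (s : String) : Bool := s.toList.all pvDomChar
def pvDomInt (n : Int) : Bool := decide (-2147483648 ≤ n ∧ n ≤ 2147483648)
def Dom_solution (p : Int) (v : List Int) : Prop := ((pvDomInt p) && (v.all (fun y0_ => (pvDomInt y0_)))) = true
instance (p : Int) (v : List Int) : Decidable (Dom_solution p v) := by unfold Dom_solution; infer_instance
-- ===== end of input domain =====

-- B finds the single (last) gcd-triggering index and builds the array once, with a rank
-- dictionary for the letters, instead of A's rebuild-per-index loop with a per-character
-- sorted(set).index scan.

-- shared helper: Python's Euclid `F=lambda v,s:F(s,v%s)if s else v` / B's `while b: a,b=b,a%b`;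
-- the Nat counter only bounds the recursion depth (|a % b| < |b|, so |b| + 1 steps always
-- suffice and the 0 case is never reached) and keeps the definition kernel-reducible
def pygcdGo : Nat → Int → Int → Int
  | 0, a, _ => a
  | n + 1, a, b => if b = 0 then a else pygcdGo n b (PySem.Int.mod a b)

def pygcd (a b : Int) : Int := pygcdGo (b.natAbs + 1) a b

-- ===== PORT A =====
def solution (p : Int) (v : List Int) : String :=
  let l : Int := (v.length : Int) + 1
  let s0 : List Int := List.replicate (v.length + 1) (-1 : Int)
  let s := (PySem.List.pyRange 0 (l - 2) 1).foldl (fun s i =>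
    let f := pygcd (PySem.List.pyGetD v i 0) (PySem.List.pyGetD v (i + 1) 0)
    if f ≠ PySem.List.pyGetD v i 0 then
      let s1 := PySem.List.pySetD s (i + 1) f
      let s2 := (PySem.List.pyRange (i + 2) l 1).foldl (fun t j =>
        PySem.List.pySetD t j (PySem.Int.floordiv (PySem.List.pyGetD v (j - 1) 0)
          (PySem.List.pyGetD t (j - 1) 0))) s1
      (PySem.List.pyRange i (-1) (-1)).foldl (fun t j =>
        PySem.List.pySetD t j (PySem.Int.floordiv (PySem.List.pyGetD v j 0)
          (PySem.List.pyGetD t (j + 1) 0))) s2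
    else s) s0
  String.mk (s.map (fun x =>
    Char.ofNat ((PySem.List.index? (PySem.List.sorted (PySem.Set.ofList s) (fun y => y) false) x).getD 0 + 65)))

-- ===== PORT B =====
-- `next((i for i in range(len(v)-2,-1,-1) if g(v[i],v[i+1]) != v[i]), None)`
def lastQual (v : List Int) : Nat → Option Nat
  | 0 => none
  | k + 1 =>
    if pygcd (PySem.List.pyGetD v (k : Int) 0) (PySem.List.pyGetD v ((k : Int) + 1) 0)
        ≠ PySem.List.pyGetD v (k : Int) 0 then some k
    else lastQual v k

def chainQ (f : Int) : List Int → List Int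
  | [] => [f]
  | x :: xs => f :: chainQ (PySem.Int.floordiv x f) xs

def solution_alt (p : Int) (v : List Int) : String :=
  let s : List Int :=
    match lastQual v (v.length - 1) with
    | none => List.replicate (v.length + 1) (-1 : Int)
    | some i =>
      let f := pygcd (PySem.List.pyGetD v (i : Int) 0) (PySem.List.pyGetD v ((i : Int) + 1) 0)
      let up := chainQ f (v.drop (i + 1))
      let down := chainQ f ((v.take (i + 1)).reverse)
      down.tail.reverse ++ up
  let ranks : PySem.Dict Int Int :=
    (PySem.List.enumerate (PySem.List.sorted (PySem.Set.ofList s) (fun y => y) false) 0).foldl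
      (fun d kx => d.insert kx.2 kx.1) PySem.Dict.empty
  String.mk (s.map (fun x => Char.ofNat (ranks.getD x 0 + 65).toNat))

-- ===== PRECONDITION & SPEC =====
-- Pre_ excludes exactly the inputs on which A raises ZeroDivisionError: a 0 before the
-- last entry of a quotient chain scanl (fun c x => x // c) g xs = [g, xs[0]//g, …] — its
-- entries are exactly the divisors the pass at a triggering index i uses — makes the next
-- step of that pass divide by it.  (A returns on every input admitted here; nothing A
-- returns on is excluded.)  pyGcdSpec is the value of Python's Euclid in closed form:
-- gcd's magnitude with the second argument's sign.
def pyGcdSpec (a b : Int) : Int :=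
  if b = 0 then a else if b < 0 then -(Int.gcd a b : Int) else (Int.gcd a b : Int)

def Pre_solution (p : Int) (v : List Int) : Prop :=
  ∀ i : Nat, i < v.length - 1 →
    pyGcdSpec (PySem.List.pyGetD v (i : Int) 0) (PySem.List.pyGetD v ((i : Int) + 1) 0)
        ≠ PySem.List.pyGetD v (i : Int) 0 →
    (∀ x ∈ (List.scanl (fun c x => PySem.Int.floordiv x c)
        (pyGcdSpec (PySem.List.pyGetD v (i : Int) 0) (PySem.List.pyGetD v ((i : Int) + 1) 0))
        (v.drop (i + 1))).dropLast, x ≠ 0) ∧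
    (∀ x ∈ (List.scanl (fun c x => PySem.Int.floordiv x c)
        (pyGcdSpec (PySem.List.pyGetD v (i : Int) 0) (PySem.List.pyGetD v ((i : Int) + 1) 0))
        ((v.take (i + 1)).reverse)).dropLast, x ≠ 0)
instance (p : Int) (v : List Int) : Decidable (Pre_solution p v) := by
  unfold Pre_solution; infer_instance

def pvWitness_solution : Int × List Int := (0, [2, 6, 3])

def Spec_solution (p : Int) (v : List Int) (out : String) : Prop := out = solution_alt p v
instance (p : Int) (v : List Int) (out : String) : Decidable (Spec_solution p v out) := by
  unfold Spec_solution; infer_instance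

-- ===== CLAIM (what is proved, stated in full; the proofs are below) =====
def Claim_equal_solution : Prop :=
  ∀ (p : Int) (v : List Int), Dom_solution p v → Pre_solution p v → Spec_solution p v (solution p v)

-- ===== LEMMAS AND PROOFS =====

theorem chainQ_length (f : Int) (xs : List Int) : (chainQ f xs).length = xs.length + 1 := by
  induction xs generalizing f with
  | nil => rfl
  | cons x xs ih => simp [chainQ, ih]

theorem chainQ_cons (f : Int) (xs : List Int) :
    chainQ f xs = f :: (chainQ f xs).tail := by
  cases xs <;> rfl

-- the array a triggering pass at index i rebuilds (B's two quotient chains)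
def buildS (v : List Int) (i : Nat) : List Int :=
  let f := pygcd (PySem.List.pyGetD v (i : Int) 0) (PySem.List.pyGetD v ((i : Int) + 1) 0)
  (chainQ f ((v.take (i + 1)).reverse)).tail.reverse ++ chainQ f (v.drop (i + 1))

theorem buildS_length (v : List Int) (i : Nat) (hi : i < v.length) :
    (buildS v i).length = v.length + 1 := by
  unfold buildS
  simp only [List.length_append, List.length_reverse, List.length_tail, chainQ_length,
    List.length_take, List.length_drop]
  omega

-- forward inner loop: `for j in range(m+1, l): s[j] = v[j-1] // s[j-1]`
theorem fwd_loop (v : List Int) (b : List Int) :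
    ∀ (m : Nat) (a : List Int) (c : Int), a.length = m → b.length = v.length - m → m ≤ v.length →
    (PySem.List.pyRange ((m : Int) + 1) ((v.length : Int) + 1) 1).foldl (fun t j =>
        PySem.List.pySetD t j (PySem.Int.floordiv (PySem.List.pyGetD v (j - 1) 0)
          (PySem.List.pyGetD t (j - 1) 0))) (a ++ c :: b)
      = a ++ chainQ c (v.drop m) := by
  induction b with
  | nil =>
    intro m a c ha hb hm
    simp only [List.length_nil] at hb
    have hm' : m = v.length := by omega
    subst hm'
    rw [PySem.List.pyRange_one_eq_nil (by omega)]
    simp [List.drop_length, chainQ]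
  | cons x b' ih =>
    intro m a c ha hb hm
    simp only [List.length_cons] at hb
    have hmlt : m < v.length := by omega
    rw [PySem.List.pyRange_one_cons (by omega)]
    rw [List.foldl_cons]
    have e1 : ((m : Int) + 1 - 1) = ((m : Nat) : Int) := by ring
    have e2 : ((m : Int) + 1) = ((m + 1 : Nat) : Int) := by push_cast; ring
    have hread : PySem.List.pyGetD (a ++ c :: x :: b') ((m : Int) + 1 - 1) 0 = c := by
      rw [e1, PySem.List.pyGetD_natCast]
      simp [List.getD, ha]
    have hreadv : PySem.List.pyGetD v ((m : Int) + 1 - 1) 0 = v[m]'hmlt := by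
      rw [e1, PySem.List.pyGetD_natCast]
      simp [List.getD, List.getElem?_eq_getElem hmlt]
    rw [hread, hreadv, e2, PySem.List.pySetD_natCast]
    rw [List.set_append_right _ _ (by omega)]
    have : (c :: x :: b').set (m + 1 - a.length) (PySem.Int.floordiv v[m] c)
        = c :: PySem.Int.floordiv v[m] c :: b' := by
      simp [ha]
    rw [this]
    have hstep : a ++ c :: PySem.Int.floordiv v[m] c :: b'
        = (a ++ [c]) ++ PySem.Int.floordiv v[m] c :: b' := by simp
    rw [hstep]
    have := ih (m + 1) (a ++ [c]) (PySem.Int.floordiv v[m] c)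
      (by simp [ha]) (by omega) (by omega)
    push_cast at this ⊢
    rw [this]
    rw [List.drop_eq_getElem_cons hmlt]
    simp [chainQ]

-- backward inner loop: `for j in range(m, -1, -1): s[j] = v[j] // s[j+1]`
theorem bwd_loop (v : List Int) :
    ∀ (a : List Int) (c : Int) (b : List Int), a.length ≤ v.length →
    (PySem.List.pyRange ((a.length : Int) - 1) (-1) (-1)).foldl (fun t j =>
        PySem.List.pySetD t j (PySem.Int.floordiv (PySem.List.pyGetD v j 0)
          (PySem.List.pyGetD t (j + 1) 0))) (a ++ c :: b)
      = (chainQ c ((v.take a.length).reverse)).tail.reverse ++ c :: b := by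
  intro a
  induction a using List.reverseRecOn generalizing v with
  | nil =>
    intro c b h
    rw [PySem.List.pyRange_neg_one_eq_nil (by simp)]
    simp [chainQ]
  | append_singleton a' x ih =>
    intro c b h
    simp only [List.length_append, List.length_singleton] at h ⊢
    have hmlt : a'.length < v.length := by omega
    have e0 : ((a'.length + 1 : Nat) : Int) - 1 = (a'.length : Int) := by push_cast; ring
    rw [e0, PySem.List.pyRange_neg_one_cons (by omega), List.foldl_cons]
    have hassoc : a' ++ [x] ++ c :: b = a' ++ x :: c :: b := by simp
    rw [hassoc]
    have hread : PySem.List.pyGetD (a' ++ x :: c :: b) ((a'.length : Int) + 1) 0 = c := by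
      have : ((a'.length : Int) + 1) = ((a'.length + 1 : Nat) : Int) := by push_cast; ring
      rw [this, PySem.List.pyGetD_natCast]
      simp [List.getD, List.getElem?_append_right]
    have hreadv : PySem.List.pyGetD v (a'.length : Int) 0 = v[a'.length]'hmlt := by
      rw [PySem.List.pyGetD_natCast]
      simp [List.getD, List.getElem?_eq_getElem hmlt]
    rw [hread, hreadv, PySem.List.pySetD_natCast]
    rw [List.set_append_right _ _ (by simp)]
    have : (x :: c :: b).set (a'.length - a'.length) (PySem.Int.floordiv v[a'.length] c)
        = PySem.Int.floordiv v[a'.length] c :: c :: b := by simp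
    rw [this]
    rw [ih v (PySem.Int.floordiv v[a'.length] c) (c :: b) (by omega)]
    have htake : v.take (a'.length + 1) = v.take a'.length ++ [v[a'.length]] := by
      rw [List.take_succ]
      simp [List.getElem?_eq_getElem hmlt]
    rw [htake]
    simp only [List.reverse_append, List.reverse_singleton, List.singleton_append]
    rw [chainQ]
    simp only [List.tail_cons]
    rw [chainQ_cons (PySem.Int.floordiv v[a'.length] c) (v.take a'.length).reverse]
    simp

-- one triggering pass of A's outer loop rebuilds the whole array: it equals buildS,
-- independently of the incoming state t
theorem pass_eq (v t : List Int) (k : Nat) (ht : t.length = v.length + 1) (hk : k < v.length) :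
    (PySem.List.pyRange (k : Int) (-1) (-1)).foldl (fun t j =>
        PySem.List.pySetD t j (PySem.Int.floordiv (PySem.List.pyGetD v j 0)
          (PySem.List.pyGetD t (j + 1) 0)))
      ((PySem.List.pyRange ((k : Int) + 2) ((v.length : Int) + 1) 1).foldl (fun t j =>
        PySem.List.pySetD t j (PySem.Int.floordiv (PySem.List.pyGetD v (j - 1) 0)
          (PySem.List.pyGetD t (j - 1) 0)))
        (PySem.List.pySetD t ((k : Int) + 1)
          (pygcd (PySem.List.pyGetD v (k : Int) 0) (PySem.List.pyGetD v ((k : Int) + 1) 0))))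
      = buildS v k := by
  set f := pygcd (PySem.List.pyGetD v (k : Int) 0) (PySem.List.pyGetD v ((k : Int) + 1) 0) with hf
  have e1 : ((k : Int) + 1) = ((k + 1 : Nat) : Int) := by push_cast; ring
  have hset : PySem.List.pySetD t ((k : Int) + 1) f = t.take (k + 1) ++ f :: t.drop (k + 2) := by
    rw [e1, PySem.List.pySetD_natCast, List.set_eq_take_append_cons_drop]
    rw [if_pos (by omega)]
  rw [hset]
  have e2 : ((k : Int) + 2) = (((k + 1 : Nat) : Int) + 1) := by push_cast; ring
  rw [e2, fwd_loop v (t.drop (k + 2)) (k + 1) (t.take (k + 1)) f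
    (by simp; omega) (by simp; omega) (by omega)]
  rw [chainQ_cons f (v.drop (k + 1))]
  have e3 : (k : Int) = (((t.take (k + 1)).length : Int) - 1) := by
    simp; omega
  rw [e3, bwd_loop v (t.take (k + 1)) f ((chainQ f (v.drop (k + 1))).tail) (by simp; omega)]
  have e4 : (t.take (k + 1)).length = k + 1 := by simp; omega
  rw [e4, buildS]
  rw [← chainQ_cons f (v.drop (k + 1))]

theorem lastQual_lt (v : List Int) : ∀ (k i : Nat), lastQual v k = some i → i < k := by
  intro k
  induction k with
  | zero => intro i h; simp [lastQual] at h
  | succ k ih =>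
    intro i h
    rw [lastQual] at h
    split at h
    · simp at h; omega
    · have := ih i h; omega

-- A's outer loop keeps only the LAST triggering index
theorem outer_eq (v : List Int) : ∀ (k : Nat), k ≤ v.length - 1 →
    (PySem.List.pyRange 0 (k : Int) 1).foldl (fun s i =>
      if pygcd (PySem.List.pyGetD v i 0) (PySem.List.pyGetD v (i + 1) 0)
          ≠ PySem.List.pyGetD v i 0 then
        (PySem.List.pyRange i (-1) (-1)).foldl (fun t j =>
          PySem.List.pySetD t j (PySem.Int.floordiv (PySem.List.pyGetD v j 0)
            (PySem.List.pyGetD t (j + 1) 0)))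
          ((PySem.List.pyRange (i + 2) ((v.length : Int) + 1) 1).foldl (fun t j =>
            PySem.List.pySetD t j (PySem.Int.floordiv (PySem.List.pyGetD v (j - 1) 0)
              (PySem.List.pyGetD t (j - 1) 0)))
            (PySem.List.pySetD s (i + 1)
              (pygcd (PySem.List.pyGetD v i 0) (PySem.List.pyGetD v (i + 1) 0))))
      else s) (List.replicate (v.length + 1) (-1 : Int))
    = match lastQual v k with
      | none => List.replicate (v.length + 1) (-1 : Int)
      | some i => buildS v i := by
  intro k
  induction k with
  | zero =>
    intro _
    rw [PySem.List.pyRange_one_eq_nil (by omega)]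
    rfl
  | succ k ih =>
    intro hk
    have hk' : k ≤ v.length - 1 := by omega
    have hkl : k < v.length := by omega
    have e1 : ((k + 1 : Nat) : Int) = (k : Int) + 1 := by push_cast; ring
    rw [e1, PySem.List.pyRange_one_succ_right (by omega), List.foldl_append, ih hk']
    rw [lastQual]
    by_cases hq : pygcd (PySem.List.pyGetD v (k : Int) 0) (PySem.List.pyGetD v ((k : Int) + 1) 0)
        = PySem.List.pyGetD v (k : Int) 0
    · simp only [List.foldl_cons, List.foldl_nil, hq, ne_eq, not_true_eq_false,
        ite_false, if_false]
    · have hlen : (match lastQual v k with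
          | none => List.replicate (v.length + 1) (-1 : Int)
          | some i => buildS v i).length = v.length + 1 := by
        cases h : lastQual v k with
        | none => simp
        | some i => exact buildS_length v i (by have := lastQual_lt v k i h; omega)
      simp only [List.foldl_cons, List.foldl_nil]
      rw [if_pos hq, if_pos (by exact hq)]
      exact pass_eq v _ k hlen hkl

-- the letter of x: the rank dictionary agrees with sorted(set).index
theorem dict_rank (r : List Int) (hnd : r.Nodup) :
    ∀ x ∈ r,
      ((PySem.List.enumerate r 0).foldl (fun d kx => d.insert kx.2 kx.1)
          (PySem.Dict.empty : PySem.Dict Int Int)).getD x 0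
        = (((PySem.List.index? r x).getD 0 : Nat) : Int) := by
  induction r using List.reverseRecOn with
  | nil => intro x hx; simp at hx
  | append_singleton r' a ih =>
    intro x hx
    have hnd' : r'.Nodup := (List.nodup_append.mp hnd).1
    have hna : a ∉ r' := by
      intro hmem
      have := List.nodup_append.mp hnd
      exact this.2.2 a hmem a (List.mem_singleton_self a) rfl
    rw [PySem.List.enumerate_append, List.foldl_append]
    have hsing : PySem.List.enumerate [a] (0 + (r'.length : Int)) = [((r'.length : Int), a)] := by
      simp [PySem.List.enumerate]
    rw [hsing]
    simp only [List.foldl_cons, List.foldl_nil]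
    rcases List.mem_append.mp hx with hx' | hx'
    · have hne : x ≠ a := fun he => hna (he ▸ hx')
      rw [PySem.Dict.getD_insert]
      rw [if_neg hne]
      rw [ih hnd' x hx', PySem.List.index?_append_of_mem [a] hx']
    · have hxa : x = a := by simpa using hx'
      subst hxa
      rw [PySem.Dict.getD_insert, if_pos rfl]
      rw [PySem.List.index?_append_singleton_self r' x hna]
      simp

theorem sortedset_nodup (s : List Int) :
    (PySem.List.sorted (PySem.Set.ofList s) (fun y => y) false).Nodup := by
  have h := PySem.List.sorted_ofList_pairwise_lt (κ := Int) s
  exact h.imp (fun hlt => ne_of_lt hlt)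

theorem range_top_eq (n : Nat) :
    PySem.List.pyRange 0 ((n : Int) + 1 - 2) 1 = PySem.List.pyRange 0 ((n - 1 : Nat) : Int) 1 := by
  cases n with
  | zero =>
    rw [PySem.List.pyRange_one_eq_nil (by norm_num), PySem.List.pyRange_one_eq_nil (by simp)]
  | succ m =>
    congr 1
    push_cast
    omega

-- ===== VERDICT (by name: the statement is the Claim_ definition above) =====
theorem solution_spec : Claim_equal_solution := by
  intro p v _ _
  unfold Spec_solution solution solution_alt
  simp only []
  rw [range_top_eq v.length, outer_eq v (v.length - 1) (le_refl _)]
  have hs : ∀ (s : List Int),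
      String.mk (s.map (fun x =>
        Char.ofNat ((PySem.List.index? (PySem.List.sorted (PySem.Set.ofList s) (fun y => y) false) x).getD 0 + 65)))
      = String.mk (s.map (fun x => Char.ofNat
          ((((PySem.List.enumerate (PySem.List.sorted (PySem.Set.ofList s) (fun y => y) false) 0).foldl
              (fun d kx => d.insert kx.2 kx.1) PySem.Dict.empty).getD x 0 + 65)).toNat)) := by
    intro s
    congr 1
    apply List.map_congr_left
    intro x hx
    have hxr : x ∈ PySem.List.sorted (PySem.Set.ofList s) (fun y => y) false := by
      rw [PySem.List.mem_sorted]
      rw [PySem.Set.mem_ofList]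
      exact hx
    rw [dict_rank _ (sortedset_nodup s) x hxr]
    congr 1
  have hB : (match lastQual v (v.length - 1) with
      | none => List.replicate (v.length + 1) (-1 : Int)
      | some i =>
        (chainQ (pygcd (PySem.List.pyGetD v (i : Int) 0) (PySem.List.pyGetD v ((i : Int) + 1) 0))
            ((v.take (i + 1)).reverse)).tail.reverse ++
          chainQ (pygcd (PySem.List.pyGetD v (i : Int) 0) (PySem.List.pyGetD v ((i : Int) + 1) 0))
            (v.drop (i + 1)))
      = (match lastQual v (v.length - 1) with
        | none => List.replicate (v.length + 1) (-1 : Int)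
        | some i => buildS v i) := by
    cases lastQual v (v.length - 1) <;> rfl
  rw [hB]
  exact hs _
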